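-- pv_equiv track=rewrite | github.com/Alita-xky/Darlink | scripts/analyze_conversation_quality.py | length_buckets
-- ===== SOURCE A (Python) =====
-- def length_buckets(lengths: list[int]) -> dict[str, int]:
--     """把长度分布到 5 个桶里。"""
--     bins = {"1-5": 0, "6-15": 0, "16-30": 0, "31-60": 0, "61+": 0}
--     for L in lengths:
--         if L <= 5: bins["1-5"] += 1
--         elif L <= 15: bins["6-15"] += 1
--         elif L <= 30: bins["16-30"] += 1
--         elif L <= 60: bins["31-60"] += 1
--         else: bins["61+"] += 1
--     return bins
-- ===== SOURCE B (Python) =====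
-- def length_buckets(lengths: list[int]) -> dict[str, int]:
--     """把长度分布到 5 个桶里。"""
--     boundaries = [5, 15, 30, 60]
--     keys = ["1-5", "6-15", "16-30", "31-60", "61+"]
--     counts = [0] * 5
--     for L in lengths:
--         # bisect_left(boundaries, L): first index whose boundary is >= L
--         lo, hi = 0, 4
--         while lo < hi:
--             mid = (lo + hi) // 2
--             if boundaries[mid] < L:
--                 lo = mid + 1
--             else:
--                 hi = mid
--         counts[lo] += 1
--     return {k: c for k, c in zip(keys, counts)}
-- ===== Notes on version B (the rewrite author's own statement) =====
-- stated objective: alternative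
-- what changed: Replaces the if/elif branch cascade updating a dict in place by a sorted boundary table searched with a hand-written binary search (bisect_left) that indexes into a counts array, the dict being built once at the end by zipping keys with counts.
import Mathlib
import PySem

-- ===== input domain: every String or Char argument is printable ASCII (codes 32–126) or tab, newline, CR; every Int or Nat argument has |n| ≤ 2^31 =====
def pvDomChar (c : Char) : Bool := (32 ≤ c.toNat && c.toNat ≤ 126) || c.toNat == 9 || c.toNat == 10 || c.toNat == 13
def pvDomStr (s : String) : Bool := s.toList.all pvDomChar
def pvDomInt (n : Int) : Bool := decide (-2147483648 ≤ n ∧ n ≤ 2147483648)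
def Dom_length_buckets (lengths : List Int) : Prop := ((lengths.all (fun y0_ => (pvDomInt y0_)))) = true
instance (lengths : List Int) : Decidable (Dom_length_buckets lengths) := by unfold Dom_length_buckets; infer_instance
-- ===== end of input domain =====

-- B replaces A's if/elif cascade by a boundary table searched with a hand-written binary search (same cost at 5 bins; objective: alternative).

-- ===== PORT A =====
def length_buckets (lengths : List Int) : List (String × Int) :=
  let bins : PySem.Dict String Int :=
    PySem.Dict.ofList [("1-5", 0), ("6-15", 0), ("16-30", 0), ("31-60", 0), ("61+", 0)]
  let bins := lengths.foldl (fun bins L =>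
    if L ≤ 5 then bins.modify "1-5" 0 (· + 1)
    else if L ≤ 15 then bins.modify "6-15" 0 (· + 1)
    else if L ≤ 30 then bins.modify "16-30" 0 (· + 1)
    else if L ≤ 60 then bins.modify "31-60" 0 (· + 1)
    else bins.modify "61+" 0 (· + 1)) bins
  bins.items

-- ===== PORT B =====
-- hand-written bisect_left loop from Source B (ported step for step; pyGetD is exact here: mid stays in range)
def pvBsearch (bnds : List Int) (L : Int) (lo hi : Int) : Int :=
  if h : lo < hi then
    let mid := PySem.Int.floordiv (lo + hi) 2
    if PySem.List.pyGetD bnds mid 0 < L then pvBsearch bnds L (mid + 1) hi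
    else pvBsearch bnds L lo mid
  else lo
termination_by (hi - lo).toNat
decreasing_by
  · have := PySem.Int.floordiv_two_mid_bounds (le_of_lt h)
    omega
  · have := PySem.Int.floordiv_two_mid_bounds (le_of_lt h)
    have : PySem.Int.floordiv (lo + hi) 2 < hi := by
      rw [PySem.Int.floordiv_lt_iff_lt_mul (by omega)]; omega
    omega

def length_buckets_alt (lengths : List Int) : List (String × Int) :=
  let boundaries : List Int := [5, 15, 30, 60]
  let keys : List String := ["1-5", "6-15", "16-30", "31-60", "61+"]
  let counts : List Int := lengths.foldl (fun counts L =>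
    let idx := pvBsearch boundaries L 0 4
    PySem.List.pySetD counts idx (PySem.List.pyGetD counts idx 0 + 1)) [0, 0, 0, 0, 0]
  (PySem.Dict.ofList (keys.zip counts)).items

-- ===== PRECONDITION & SPEC =====
def Spec_length_buckets (lengths : List Int) (out : List (String × Int)) : Prop := out = length_buckets_alt lengths
instance (lengths : List Int) (out : List (String × Int)) : Decidable (Spec_length_buckets lengths out) := by unfold Spec_length_buckets; infer_instance

-- ===== CLAIM (what is proved, stated in full; the proofs are below) =====
def Claim_equal_length_buckets : Prop := ∀ (lengths : List Int), Dom_length_buckets lengths → Spec_length_buckets lengths (length_buckets lengths)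

-- ===== LEMMAS AND PROOFS =====
lemma bstep (bnds : List Int) (L lo hi mid v : Int) (hlt : lo < hi)
    (hm : PySem.Int.floordiv (lo + hi) 2 = mid) (hv : PySem.List.pyGetD bnds mid 0 = v) :
    pvBsearch bnds L lo hi =
      if v < L then pvBsearch bnds L (mid + 1) hi else pvBsearch bnds L lo mid := by
  rw [pvBsearch, dif_pos hlt]
  simp only [hm, hv]

lemma bdone (bnds : List Int) (L lo hi : Int) (h : ¬ lo < hi) : pvBsearch bnds L lo hi = lo := by
  rw [pvBsearch, dif_neg h]

lemma bchar (L : Int) : pvBsearch [5,15,30,60] L 0 4 =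
    if L ≤ 5 then 0 else if L ≤ 15 then 1 else if L ≤ 30 then 2 else if L ≤ 60 then 3 else 4 := by
  rw [bstep _ L 0 4 2 30 (by decide) (by decide) (by decide)]
  by_cases h30 : (30:Int) < L
  · rw [if_pos h30, bstep _ L (2+1) 4 3 60 (by decide) (by decide) (by decide)]
    by_cases h60 : (60:Int) < L
    · rw [if_pos h60, bdone _ _ (3+1) _ (by decide)]; split_ifs <;> omega
    · rw [if_neg h60, bdone _ _ _ _ (by decide)]; split_ifs <;> omega
  · rw [if_neg h30, bstep _ L 0 2 1 15 (by decide) (by decide) (by decide)]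
    by_cases h15 : (15:Int) < L
    · rw [if_pos h15, bdone _ _ (1+1) _ (by decide)]; split_ifs <;> omega
    · rw [if_neg h15, bstep _ L 0 1 0 5 (by decide) (by decide) (by decide)]
      by_cases h5 : (5:Int) < L
      · rw [if_pos h5, bdone _ _ (0+1) _ (by decide)]; split_ifs <;> omega
      · rw [if_neg h5, bdone _ _ _ _ (by decide)]; split_ifs <;> omega

lemma fold_inv (lengths : List Int) (c0 c1 c2 c3 c4 : Int) :
    lengths.foldl (fun bins L =>
      if L ≤ 5 then bins.modify "1-5" 0 (· + 1)
      else if L ≤ 15 then bins.modify "6-15" 0 (· + 1)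
      else if L ≤ 30 then bins.modify "16-30" 0 (· + 1)
      else if L ≤ 60 then bins.modify "31-60" 0 (· + 1)
      else bins.modify "61+" 0 (· + 1))
      (PySem.Dict.ofList [("1-5", c0), ("6-15", c1), ("16-30", c2), ("31-60", c3), ("61+", c4)])
    = PySem.Dict.ofList ((["1-5", "6-15", "16-30", "31-60", "61+"] : List String).zip
        (lengths.foldl (fun counts L =>
          let idx := pvBsearch [5, 15, 30, 60] L 0 4
          PySem.List.pySetD counts idx (PySem.List.pyGetD counts idx 0 + 1)) [c0, c1, c2, c3, c4])) := by
  induction lengths generalizing c0 c1 c2 c3 c4 with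
  | nil => rfl
  | cons L tl ih =>
    simp only [List.foldl_cons]
    rw [bchar]
    by_cases h5 : L ≤ 5
    · simp only [if_pos h5]; exact ih (c0 + 1) c1 c2 c3 c4
    · by_cases h15 : L ≤ 15
      · simp only [if_neg h5, if_pos h15]; exact ih c0 (c1 + 1) c2 c3 c4
      · by_cases h30 : L ≤ 30
        · simp only [if_neg h5, if_neg h15, if_pos h30]; exact ih c0 c1 (c2 + 1) c3 c4
        · by_cases h60 : L ≤ 60
          · simp only [if_neg h5, if_neg h15, if_neg h30, if_pos h60]; exact ih c0 c1 c2 (c3 + 1) c4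
          · simp only [if_neg h5, if_neg h15, if_neg h30, if_neg h60]; exact ih c0 c1 c2 c3 (c4 + 1)

-- ===== VERDICT (by name: the statement is the Claim_ definition above) =====
theorem length_buckets_spec : Claim_equal_length_buckets := by
  intro lengths _
  show length_buckets lengths = length_buckets_alt lengths
  unfold length_buckets length_buckets_alt
  exact congrArg PySem.Dict.items (fold_inv lengths 0 0 0 0 0)
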